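-- pv_equiv track=rewrite | github.com/ssh-mitm/ssh-mitm | sshmitm/commands/pluginbrowser/formatters.py | cli_help_to_markdown
-- ===== SOURCE A (Python) =====
-- def cli_help_to_markdown(text: str) -> str:
--     """Convert CLI-formatted module help text to Markdown."""
--     lines = text.split("\n")
--     out: list[str] = []
--     i = 0
--     while i < len(lines):
--         line = lines[i]
--         if line.startswith("default module:"):
--             module = line[len("default module:") :].strip()
--             if out and out[-1] != "":
--                 out.append("")
--             out.append(f"**Default module:** `{module}`")
--         elif line.strip() == "available modules:":
--             if out and out[-1] != "":
--                 out.append("")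
--             out.append("**Available modules:**\n")
--             i += 1
--             while i < len(lines):
--                 entry = lines[i]
--                 stripped = entry.lstrip("\t").lstrip()
--                 if not stripped.startswith("* "):
--                     break
--                 content = stripped[2:]
--                 if " -> " in content:
--                     name, desc = content.split(" -> ", 1)
--                     out.append(f"- **{name}**" + (f" — {desc}" if desc.strip() else ""))
--                 else:
--                     out.append(f"- **{content}**")
--                 i += 1
--             continue
--         else:
--             out.append(line)
--         i += 1
--     return "\n".join(out)
-- ===== SOURCE B (Python) =====
-- def cli_help_to_markdown(text: str) -> str:
--     """Convert CLI-formatted module help text to Markdown (single flat pass with a flag)."""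
--     out: list[str] = []
--     in_modules = False
--     for line in text.split("\n"):
--         stripped = line.lstrip("\t").lstrip()
--         if in_modules and stripped.startswith("* "):
--             content = stripped[2:]
--             if " -> " in content:
--                 name, desc = content.split(" -> ", 1)
--                 out.append("- **" + name + "**" + (" — " + desc if desc.strip() else ""))
--             else:
--                 out.append("- **" + content + "**")
--             continue
--         if line.startswith("default module:"):
--             in_modules = False
--             if out and out[-1] != "":
--                 out.append("")
--             out.append("**Default module:** `" + line[len("default module:"):].strip() + "`")
--         elif line.strip() == "available modules:":
--             in_modules = True
--             if out and out[-1] != "":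
--                 out.append("")
--             out.append("**Available modules:**\n")
--         else:
--             in_modules = False
--             out.append(line)
--     return "\n".join(out)
-- ===== Notes on version B (the rewrite author's own statement) =====
-- stated objective: simpler
-- what changed: Replaces A's outer index loop with a nested consuming inner loop (and break-then-reprocess via continue) by a single flat for-loop over the lines that carries an in_modules boolean flag and falls through to the normal branches on the line that ends a module list.
import Mathlib
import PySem

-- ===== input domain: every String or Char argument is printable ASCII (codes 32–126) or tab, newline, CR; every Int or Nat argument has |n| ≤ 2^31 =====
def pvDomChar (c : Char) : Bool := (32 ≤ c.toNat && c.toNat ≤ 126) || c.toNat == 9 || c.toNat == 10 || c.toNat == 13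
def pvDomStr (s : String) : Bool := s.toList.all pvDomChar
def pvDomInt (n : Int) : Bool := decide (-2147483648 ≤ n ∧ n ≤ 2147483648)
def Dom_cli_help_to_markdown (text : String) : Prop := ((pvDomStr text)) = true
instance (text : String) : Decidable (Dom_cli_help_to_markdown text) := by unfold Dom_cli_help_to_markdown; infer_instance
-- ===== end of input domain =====

-- B replaces A's outer-index loop with a nested consuming inner loop by one flat fold over the
-- lines that carries an `in_modules` flag (objective: simpler, same O(n) cost).

-- ===== PORT A =====
-- s.lstrip("\t"): drop leading tab characters (exact: the chars argument is the single char '\t')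
def pvA_lstripTabs (s : String) : String := String.ofList (s.toList.dropWhile (· == '\t'))

-- `if out and out[-1] != "": out.append("")`
def pvA_pad (out : List String) : List String :=
  if out ≠ [] ∧ out.getLast? ≠ some "" then out ++ [""] else out

-- the body of A's inner loop after `stripped` passed the "* " test: format one module entry
def pvA_entry (stripped : String) : String :=
  let content := PySem.Str.slice stripped (some 2) none
  if PySem.Str.isIn " -> " content then
    -- `name, desc = content.split(" -> ", 1)`: exactly two parts since " -> " occurs in content
    let parts := (PySem.Str.splitMax? content " -> " 1).getD []
    let name := parts.headD ""
    let desc := (parts.drop 1).headD ""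
    "- **" ++ name ++ "**" ++ (if PySem.Str.strip desc = "" then "" else " — " ++ desc)
  else
    "- **" ++ content ++ "**"

-- A's inner `while i < len(lines)` loop: consumes "* " entries, returns (remaining lines, out)
def pvA_inner : List String → List String → List String × List String
  | [], out => ([], out)
  | entry :: rest, out =>
    let stripped := PySem.Str.lstrip (pvA_lstripTabs entry)
    if PySem.Str.startswith stripped "* " then
      pvA_inner rest (out ++ [pvA_entry stripped])
    else (entry :: rest, out)

theorem pvA_inner_len : ∀ (l out : List String), (pvA_inner l out).1.length ≤ l.length := by
  intro l
  induction l with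
  | nil => intro out; simp [pvA_inner]
  | cons e rest ih =>
    intro out
    simp only [pvA_inner]
    split
    · exact le_trans (ih _) (by simp)
    · simp

-- A's outer `while i < len(lines)` loop; the line the inner loop breaks on is reprocessed (continue)
def pvA_loop : List String → List String → List String
  | [], out => out
  | line :: rest, out =>
    if PySem.Str.startswith line "default module:" then
      pvA_loop rest (pvA_pad out ++
        ["**Default module:** `" ++ PySem.Str.strip (PySem.Str.slice line (some 15) none) ++ "`"])
    else if PySem.Str.strip line = "available modules:" then
      let r := pvA_inner rest (pvA_pad out ++ ["**Available modules:**\n"])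
      pvA_loop r.1 r.2
    else pvA_loop rest (out ++ [line])
  termination_by l _ => l.length
  decreasing_by
  · simp
  · have := pvA_inner_len rest (pvA_pad out ++ ["**Available modules:**\n"])
    simp; omega
  · simp

  -- text.split("\n"): sep ≠ "" so Str.split? is always some; getD [] is never taken
def cli_help_to_markdown (text : String) : String :=
  PySem.Str.join "\n" (pvA_loop (((PySem.Str.split? text "\n").getD [])) [])

-- ===== PORT B =====
def pvB_lstripTabs (s : String) : String := String.ofList (s.toList.dropWhile (· == '\t'))

def pvB_pad (out : List String) : List String :=
  if out ≠ [] ∧ out.getLast? ≠ some "" then out ++ [""] else out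

def pvB_entry (stripped : String) : String :=
  let content := PySem.Str.slice stripped (some 2) none
  if PySem.Str.isIn " -> " content then
    let parts := (PySem.Str.splitMax? content " -> " 1).getD []
    let name := parts.headD ""
    let desc := (parts.drop 1).headD ""
    "- **" ++ name ++ "**" ++ (if PySem.Str.strip desc = "" then "" else " — " ++ desc)
  else
    "- **" ++ content ++ "**"

-- one step of B's single flat loop; state = (in_modules flag, out)
def pvB_step (st : Bool × List String) (line : String) : Bool × List String :=
  let stripped := PySem.Str.lstrip (pvB_lstripTabs line)
  if st.1 && PySem.Str.startswith stripped "* " then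
    (true, st.2 ++ [pvB_entry stripped])
  else if PySem.Str.startswith line "default module:" then
    (false, pvB_pad st.2 ++
      ["**Default module:** `" ++ PySem.Str.strip (PySem.Str.slice line (some 15) none) ++ "`"])
  else if PySem.Str.strip line = "available modules:" then
    (true, pvB_pad st.2 ++ ["**Available modules:**\n"])
  else (false, st.2 ++ [line])

def cli_help_to_markdown_alt (text : String) : String :=
  PySem.Str.join "\n" (((((PySem.Str.split? text "\n").getD [])).foldl pvB_step (false, [])).2)

-- ===== PRECONDITION & SPEC =====
def Spec_cli_help_to_markdown (text : String) (out : String) : Prop := out = cli_help_to_markdown_alt text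
instance (text : String) (out : String) : Decidable (Spec_cli_help_to_markdown text out) := by unfold Spec_cli_help_to_markdown; infer_instance

-- ===== CLAIM (what is proved, stated in full; the proofs are below) =====
def Claim_equal_cli_help_to_markdown : Prop := ∀ (text : String), Dom_cli_help_to_markdown text → Spec_cli_help_to_markdown text (cli_help_to_markdown text)

-- ===== LEMMAS AND PROOFS =====

-- the two ports' helpers are transliterations of identical Python code, hence definitionally equal
theorem pvB_pad_eq : pvB_pad = pvA_pad := rfl
theorem pvB_entry_eq : pvB_entry = pvA_entry := rfl
theorem pvB_lstripTabs_eq : pvB_lstripTabs = pvA_lstripTabs := rfl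

-- main invariant: A's outer loop = B's fold with the flag off, and
-- A's (inner loop; then outer loop on the remainder) = B's fold with the flag on
theorem pv_key : ∀ (n : ℕ) (lines : List String), lines.length ≤ n → ∀ (out : List String),
    (pvA_loop lines out = (lines.foldl pvB_step (false, out)).2) ∧
    (pvA_loop (pvA_inner lines out).1 (pvA_inner lines out).2 = (lines.foldl pvB_step (true, out)).2) := by
  intro n
  induction n with
  | zero =>
    intro lines h out
    have : lines = [] := List.eq_nil_of_length_eq_zero (Nat.le_zero.mp h)
    subst this
    simp [pvA_loop, pvA_inner]
  | succ n ih =>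
    intro lines h
    have c1 : ∀ (l : List String), l.length ≤ n + 1 → ∀ (out : List String),
        pvA_loop l out = (l.foldl pvB_step (false, out)).2 := by
      intro l hl out
      match l with
      | [] => simp [pvA_loop]
      | line :: rest =>
        have hr : rest.length ≤ n := by simp at hl; omega
        by_cases hd : PySem.Str.startswith line "default module:" = true
        · simp at hd
          have hstep : pvB_step (false, out) line =
              (false, pvB_pad out ++
                ["**Default module:** `" ++ PySem.Str.strip (PySem.Str.slice line (some 15) none) ++ "`"]) := by
            simp [pvB_step, hd]
          rw [show pvA_loop (line :: rest) out = pvA_loop rest (pvA_pad out ++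
                ["**Default module:** `" ++ PySem.Str.strip (PySem.Str.slice line (some 15) none) ++ "`"])
              from by rw [pvA_loop]; simp [hd]]
          rw [List.foldl_cons, hstep, pvB_pad_eq]
          exact (ih rest hr _).1
        · simp at hd
          by_cases ha : PySem.Str.strip line = "available modules:"
          · have hstep : pvB_step (false, out) line =
                (true, pvB_pad out ++ ["**Available modules:**\n"]) := by
              simp [pvB_step, hd, ha]
            rw [show pvA_loop (line :: rest) out =
                  pvA_loop (pvA_inner rest (pvA_pad out ++ ["**Available modules:**\n"])).1
                           (pvA_inner rest (pvA_pad out ++ ["**Available modules:**\n"])).2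
                from by rw [pvA_loop]; simp [hd, ha]]
            rw [List.foldl_cons, hstep, pvB_pad_eq]
            exact (ih rest hr _).2
          · have hstep : pvB_step (false, out) line = (false, out ++ [line]) := by
              simp [pvB_step, hd, ha]
            rw [show pvA_loop (line :: rest) out = pvA_loop rest (out ++ [line])
                from by rw [pvA_loop]; simp [hd, ha]]
            rw [List.foldl_cons, hstep]
            exact (ih rest hr _).1
    intro out
    refine ⟨c1 lines h out, ?_⟩
    match lines with
    | [] => simp [pvA_loop, pvA_inner]
    | line :: rest =>
      have hr : rest.length ≤ n := by simp at h; omega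
      by_cases hs : PySem.Str.startswith (PySem.Str.lstrip (pvA_lstripTabs line)) "* " = true
      · simp at hs
        have hin : pvA_inner (line :: rest) out =
            pvA_inner rest (out ++ [pvA_entry (PySem.Str.lstrip (pvA_lstripTabs line))]) := by
          simp [pvA_inner, hs]
        have hstep : pvB_step (true, out) line =
            (true, out ++ [pvA_entry (PySem.Str.lstrip (pvA_lstripTabs line))]) := by
          simp [pvB_step, pvB_lstripTabs_eq, pvB_entry_eq, hs]
        rw [hin, List.foldl_cons, hstep]
        exact (ih rest hr _).2
      · simp at hs
        have hin : pvA_inner (line :: rest) out = (line :: rest, out) := by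
          simp [pvA_inner, hs]
        rw [hin]
        have hflag : pvB_step (true, out) line = pvB_step (false, out) line := by
          simp [pvB_step, pvB_lstripTabs_eq, hs]
        calc pvA_loop (line :: rest) out
            = ((line :: rest).foldl pvB_step (false, out)).2 := c1 (line :: rest) h out
          _ = (rest.foldl pvB_step (pvB_step (false, out) line)).2 := by rw [List.foldl_cons]
          _ = (rest.foldl pvB_step (pvB_step (true, out) line)).2 := by rw [hflag]
          _ = ((line :: rest).foldl pvB_step (true, out)).2 := by rw [List.foldl_cons]

-- ===== VERDICT (by name: the statement is the Claim_ definition above) =====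
theorem cli_help_to_markdown_spec : Claim_equal_cli_help_to_markdown := by
  intro text _
  unfold Spec_cli_help_to_markdown cli_help_to_markdown cli_help_to_markdown_alt
  rw [(pv_key (((PySem.Str.split? text "\n").getD [])).length _ le_rfl []).1]
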